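-- pv_equiv track=rewrite | github.com/c788630/Numclass | src/numclass/classifiers/combinatorial_geometric.py | _partition_numbers_up_to
-- ===== SOURCE A (Python) =====
-- def _partition_numbers_up_to(limit_val: int, max_n: int = 5000) -> list[int]:
--     """
--     Generate p(0)..p(n) until p(n) exceeds limit_val or n reaches max_n.
--     Uses Euler's pentagonal recurrence.
--     """
--     p = [1]  # p(0)=1
--     n = 1
--     while True:
--         total = 0
--         k = 1
--         while True:
--             pent1 = k * (3 * k - 1) // 2
--             pent2 = k * (3 * k + 1) // 2
--             if pent1 > n and pent2 > n:
--                 break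
--             sign = -1 if (k % 2 == 0) else 1
--             if pent1 <= n:
--                 total += sign * p[n - pent1]
--             if pent2 <= n:
--                 total += sign * p[n - pent2]
--             k += 1
--         p.append(total)
--         if total > limit_val or n >= max_n:
--             return p
--         n += 1
-- ===== SOURCE B (Python) =====
-- def _partition_numbers_up_to(limit_val: int, max_n: int = 5000) -> list[int]:
--     """
--     Generate p(0)..p(n) until p(n) exceeds limit_val or n reaches max_n.
--     Counts partitions via the bounded-part table row[k] = P(n, k) = number of
--     partitions of n into parts of size at most k, using
--     P(n, k) = P(n, k-1) + P(n-k, k), growing one row per n instead of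
--     Euler's pentagonal recurrence.
--     """
--     rows = [[1]]          # rows[m][k] = P(m, k) for k in 0..m
--     p = [1]               # p[0] = 1
--     n = 1
--     while True:
--         row = [0]         # P(n, 0) = 0 for n >= 1
--         last = 0
--         k = 0
--         for prev in reversed(rows):   # prev = rows[n-k] as k runs 1..n
--             k += 1
--             m = n - k
--             last = last + prev[min(k, m)]
--             row.append(last)
--         rows.append(row)
--         p.append(last)
--         if last > limit_val or n >= max_n:
--             return p
--         n += 1
-- ===== Notes on version B (the rewrite author's own statement) =====
-- stated objective: alternative
-- what changed: Replaces Euler's pentagonal-number recurrence (inner while loop over pentagonal indices with alternating signs) by the bounded-part counting table P(n,k) = P(n,k-1) + P(n-k,k), grown one row per n with a running sum over the previous rows in reverse, keeping A's exact dynamic stop (first p(n) > limit_val, or n reaching max_n).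
import Mathlib
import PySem

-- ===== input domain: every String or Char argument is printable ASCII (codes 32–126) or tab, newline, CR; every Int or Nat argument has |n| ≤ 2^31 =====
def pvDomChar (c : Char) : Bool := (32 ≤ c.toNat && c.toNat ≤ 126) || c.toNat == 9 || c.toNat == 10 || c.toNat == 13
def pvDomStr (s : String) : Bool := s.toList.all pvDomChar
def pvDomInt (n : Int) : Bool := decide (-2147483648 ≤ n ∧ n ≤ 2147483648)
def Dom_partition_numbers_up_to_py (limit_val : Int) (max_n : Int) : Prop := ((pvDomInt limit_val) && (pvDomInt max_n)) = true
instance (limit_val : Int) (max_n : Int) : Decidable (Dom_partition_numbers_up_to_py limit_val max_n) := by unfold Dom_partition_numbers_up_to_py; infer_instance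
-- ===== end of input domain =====

-- B replaces Euler's pentagonal recurrence by the bounded-part counting table
-- P(n,k) = P(n,k-1) + P(n-k,k), grown one row per n (objective: alternative algorithm).

-- ===== PORT A =====
-- Inner 'while True: … break' over k; the Nat argument is a structural fuel bound that
-- only makes the recursion total and is never exhausted (the loop breaks by k = n+1, and
-- it is called with fuel n.toNat + 1 for the reachable indices n ≥ 1).
def pentInner (n : Int) (p : List Int) (total : Int) (k : Int) : Nat → Int
  | 0 => total
  | fuel + 1 =>
    let pent1 := PySem.Int.floordiv (k * (3 * k - 1)) 2
    let pent2 := PySem.Int.floordiv (k * (3 * k + 1)) 2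
    if pent1 > n ∧ pent2 > n then total
    else
      let sign : Int := if PySem.Int.mod k 2 = 0 then -1 else 1
      -- p[n - pent1] / p[n - pent2]: the index is nonnegative and in range here, pyGetD is exact
      let t1 := if pent1 ≤ n then total + sign * PySem.List.pyGetD p (n - pent1) 0 else total
      let t2 := if pent2 ≤ n then t1 + sign * PySem.List.pyGetD p (n - pent2) 0 else t1
      pentInner n p t2 (k + 1) fuel

-- Outer 'while True' of A: it returns at latest when n reaches max_n.
def loopA (limit_val max_n : Int) (n : Int) (p : List Int) : List Int :=
  let total := pentInner n p 0 1 (n.toNat + 1)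
  let p' := p ++ [total]
  if total > limit_val ∨ n ≥ max_n then p'
  else loopA limit_val max_n (n + 1) p'
termination_by (max_n - n).toNat
decreasing_by omega

def partition_numbers_up_to_py (limit_val : Int) (max_n : Int) : List Int :=
  loopA limit_val max_n 1 [1]

-- ===== PORT B =====
-- one iteration of B's 'for prev in reversed(rows)': state (row, last, k)
def rowStepB (n : Int) (st : List Int × Int × Int) (prev : List Int) : List Int × Int × Int :=
  let k := st.2.2 + 1
  let m := n - k
  let last := st.2.1 + PySem.List.pyGetD prev (min k m) 0
  (st.1 ++ [last], last, k)

-- builds row n of the bounded-part table from the previous rows; returns (row, last)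
def rowB (rows : List (List Int)) (n : Int) : List Int × Int :=
  let st := rows.reverse.foldl (rowStepB n) ([0], 0, 0)
  (st.1, st.2.1)

-- Outer 'while True' of B.
def loopB (limit_val max_n : Int) (n : Int) (rows : List (List Int)) (p : List Int) : List Int :=
  let r := rowB rows n
  let rows' := rows ++ [r.1]
  let p' := p ++ [r.2]
  if r.2 > limit_val ∨ n ≥ max_n then p'
  else loopB limit_val max_n (n + 1) rows' p'
termination_by (max_n - n).toNat
decreasing_by omega

def partition_numbers_up_to_py_alt (limit_val : Int) (max_n : Int) : List Int :=
  loopB limit_val max_n 1 [[1]] [1]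

-- ===== PRECONDITION & SPEC =====
def Spec_partition_numbers_up_to_py (limit_val : Int) (max_n : Int) (out : List Int) : Prop := out = partition_numbers_up_to_py_alt limit_val max_n
instance (limit_val : Int) (max_n : Int) (out : List Int) : Decidable (Spec_partition_numbers_up_to_py limit_val max_n out) := by unfold Spec_partition_numbers_up_to_py; infer_instance

-- ===== CLAIM (what is proved, stated in full; the proofs are below) =====
def Claim_equal_partition_numbers_up_to_py : Prop := ∀ (limit_val : Int) (max_n : Int), Dom_partition_numbers_up_to_py limit_val max_n → Spec_partition_numbers_up_to_py limit_val max_n (partition_numbers_up_to_py limit_val max_n)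

-- ===== LEMMAS AND PROOFS =====

-- Reference tables: the state of each loop after reaching index m, built from the
-- ports' own step helpers.  pentTab m = A's list p(0)..p(m); partTabAux m = B's (rows, p).
def pentTab : Nat → List Int
  | 0 => [1]
  | m + 1 => pentTab m ++ [pentInner ((m : Int) + 1) (pentTab m) 0 1 (m + 2)]

def partTabAux : Nat → List (List Int) × List Int
  | 0 => ([[1]], [1])
  | m + 1 =>
    ((partTabAux m).1 ++ [(rowB (partTabAux m).1 ((m : Int) + 1)).1],
     (partTabAux m).2 ++ [(rowB (partTabAux m).1 ((m : Int) + 1)).2])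

-- Within Dom, |limit_val| ≤ 2^31 and p(122) = 2291320912 > 2^31, so neither loop ever
-- runs past index 122: the two sequences only have to agree up to there, a finite check.
set_option maxRecDepth 1000000 in
set_option maxHeartbeats 12000000 in
theorem tabs_eq_122 : (partTabAux 122).2 = pentTab 122 := by decide

set_option maxRecDepth 1000000 in
set_option maxHeartbeats 4000000 in
theorem p122_big : (2147483648 : Int) < (pentTab 122).getLastD 0 := by decide

theorem pentTab_length (m : Nat) : (pentTab m).length = m + 1 := by
  induction m with
  | zero => rfl
  | succ m ih => simp [pentTab, ih]

theorem partTab_length (m : Nat) : ((partTabAux m).2).length = m + 1 := by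
  induction m with
  | zero => rfl
  | succ m ih => simp [partTabAux, ih]

theorem pentTab_take (m : Nat) : ∀ j, pentTab m = (pentTab (m + j)).take (m + 1) := by
  intro j
  induction j with
  | zero => exact (List.take_of_length_le (le_of_eq (pentTab_length m))).symm
  | succ j ih =>
      have h : m + (j + 1) = (m + j) + 1 := by omega
      rw [h, pentTab, List.take_append_of_le_length (by rw [pentTab_length]; omega), ← ih]

theorem partTab_take (m : Nat) : ∀ j, (partTabAux m).2 = ((partTabAux (m + j)).2).take (m + 1) := by
  intro j
  induction j with
  | zero => exact (List.take_of_length_le (le_of_eq (partTab_length m))).symm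
  | succ j ih =>
      have h : m + (j + 1) = (m + j) + 1 := by omega
      rw [h, partTabAux]
      dsimp only
      rw [List.take_append_of_le_length (by rw [partTab_length]; omega), ← ih]

theorem tabs_eq (m : Nat) (hm : m ≤ 122) : pentTab m = (partTabAux m).2 := by
  obtain ⟨j, hj⟩ := Nat.exists_eq_add_of_le hm
  rw [pentTab_take m j, partTab_take m j, ← hj, tabs_eq_122]

-- the value both loops append at index m+1 is the same, for every reachable step
theorem step_eq (m : Nat) (hm : m ≤ 121) :
    pentInner ((m : Int) + 1) (pentTab m) 0 1 (m + 2) = (rowB (partTabAux m).1 ((m : Int) + 1)).2 := by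
  have h1 : pentTab (m + 1) = (partTabAux (m + 1)).2 := tabs_eq (m + 1) (by omega)
  have h0 : pentTab m = (partTabAux m).2 := tabs_eq m (by omega)
  rw [pentTab, partTabAux] at h1
  dsimp only at h1
  rw [← h0] at h1
  simpa using h1

theorem step_122_big : (2147483648 : Int) < pentInner (((121 : Nat) : Int) + 1) (pentTab 121) 0 1 123 := by
  have h := p122_big
  rw [pentTab, List.getLastD_concat] at h
  exact h

theorem loops_agree (limit_val max_n : Int) (hl : limit_val ≤ 2147483648) :
    ∀ d m : Nat, m + d = 121 →
      loopA limit_val max_n ((m : Int) + 1) (pentTab m)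
        = loopB limit_val max_n ((m : Int) + 1) (partTabAux m).1 (partTabAux m).2 := by
  intro d
  induction d with
  | zero =>
      intro m hm
      have hm' : m = 121 := by omega
      subst hm'
      rw [loopA, loopB]
      have hfuel : ((((121 : Nat) : Int)) + 1).toNat + 1 = 121 + 2 := by omega
      rw [hfuel]
      have hv := step_eq 121 (by omega)
      have hstopA : pentInner (((121 : Nat) : Int) + 1) (pentTab 121) 0 1 (121 + 2) > limit_val :=
        lt_of_le_of_lt hl step_122_big
      have hstopB := hstopA
      rw [hv] at hstopB
      rw [if_pos (Or.inl hstopA), if_pos (Or.inl hstopB), ← hv, tabs_eq 121 (by omega)]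
  | succ d ih =>
      intro m hm
      rw [loopA, loopB]
      have hfuel : (((m : Nat) : Int) + 1).toNat + 1 = m + 2 := by omega
      rw [hfuel]
      have hv := step_eq m (by omega)
      by_cases hc : pentInner (((m : Nat) : Int) + 1) (pentTab m) 0 1 (m + 2) > limit_val ∨ ((m : Int) + 1) ≥ max_n
      · have hc' := hc
        rw [hv] at hc'
        rw [if_pos hc, if_pos hc', ← hv, tabs_eq m (by omega)]
      · have hc' := hc
        rw [hv] at hc'
        rw [if_neg hc, if_neg hc']
        have e1 : pentTab m ++ [pentInner (((m : Nat) : Int) + 1) (pentTab m) 0 1 (m + 2)] = pentTab (m + 1) := by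
          rw [pentTab]
        have e2 : (partTabAux m).1 ++ [(rowB (partTabAux m).1 ((m : Int) + 1)).1] = (partTabAux (m + 1)).1 := by
          rw [partTabAux]
        have e3 : (partTabAux m).2 ++ [(rowB (partTabAux m).1 ((m : Int) + 1)).2] = (partTabAux (m + 1)).2 := by
          rw [partTabAux]
        rw [e1, e2, e3]
        have hidx : ((m : Int) + 1) + 1 = (((m + 1 : Nat) : Int)) + 1 := by push_cast; ring
        rw [hidx]
        exact ih (m + 1) (by omega)

-- ===== VERDICT (by name: the statement is the Claim_ definition above) =====
theorem partition_numbers_up_to_py_spec : Claim_equal_partition_numbers_up_to_py := by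
  intro limit_val max_n hdom
  have hl : limit_val ≤ 2147483648 := by
    unfold Dom_partition_numbers_up_to_py pvDomInt at hdom
    simp at hdom
    omega
  unfold Spec_partition_numbers_up_to_py partition_numbers_up_to_py partition_numbers_up_to_py_alt
  have h := loops_agree limit_val max_n hl 121 0 (by omega)
  simpa [pentTab, partTabAux] using h
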